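-- pv_equiv track=rewrite | github.com/melsayed-7/H.264-implementation | helpers.py | reverse_run_length
-- ===== SOURCE A (Python) =====
-- def reverse_run_length(encoded):
--     encoded  = list(encoded)
--     decoded = []
--
--     flag= 0
--     for i in range(len(encoded)):
--
--       if (flag ==0):
--
--         if(encoded[i]!=0):
--           flag =0
--           decoded.append(encoded[i])
--
--         elif(encoded[i]==0):
--           for j in range(encoded[i+1]):
--             decoded.append(0)
--           flag = 1
--           continue
--
--       flag = 0
--
--     return decoded
-- ===== SOURCE B (Python) =====
-- def reverse_run_length(encoded):
--     stack = list(encoded)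
--     stack.reverse()
--     decoded = []
--     while stack:
--         x = stack.pop()
--         if x != 0:
--             decoded.append(x)
--         else:
--             decoded.extend([0] * stack.pop())
--     return decoded
-- ===== Notes on version B (the rewrite author's own statement) =====
-- stated objective: alternative
-- what changed: Replaces A's index loop over range(len(encoded)) with a flag variable marking count positions to skip by a consuming stack: pop an element, keep it if nonzero, otherwise pop the count too and extend with [0]*count, so no flag or index bookkeeping remains.
-- outside the precondition, e.g. on reverse_run_length([0]): A raises IndexError, B raises IndexError
import Mathlib
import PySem

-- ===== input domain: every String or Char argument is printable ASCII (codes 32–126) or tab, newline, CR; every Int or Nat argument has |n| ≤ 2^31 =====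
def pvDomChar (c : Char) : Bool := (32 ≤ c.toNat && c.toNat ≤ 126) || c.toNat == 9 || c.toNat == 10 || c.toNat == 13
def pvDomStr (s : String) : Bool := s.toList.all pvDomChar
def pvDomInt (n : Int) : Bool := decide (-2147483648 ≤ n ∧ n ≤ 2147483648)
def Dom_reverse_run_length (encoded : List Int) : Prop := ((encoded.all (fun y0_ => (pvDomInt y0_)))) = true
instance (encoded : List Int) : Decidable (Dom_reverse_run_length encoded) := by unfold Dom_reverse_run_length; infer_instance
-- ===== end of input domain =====

-- B replaces A's indexed for-loop with a skip flag by a consuming stack (pop one element, or two for a zero run); alternative decomposition, same cost class.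

-- ===== PORT A =====
-- one step of A's for-loop body: state = (flag, decoded); encoded[i+1] out of range (IndexError) is excluded by Pre_
def pvStepA (encoded : List Int) (st : Int × List Int) (i : Int) : Int × List Int :=
  if st.1 == 0 then
    if PySem.List.pyGetD encoded i 0 ≠ 0 then
      (0, st.2 ++ [PySem.List.pyGetD encoded i 0])
    else
      (1, (PySem.List.pyRange 0 (PySem.List.pyGetD encoded (i + 1) 0) 1).foldl
            (fun d _ => d ++ [0]) st.2)
  else (0, st.2)

def reverse_run_length (encoded : List Int) : List Int :=
  ((PySem.List.pyRange 0 (encoded.length : Int) 1).foldl (pvStepA encoded) (0, [])).2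

-- ===== PORT B =====
-- B's loop state: (stack, decoded). Python reverses the stack and pops from its END, so it
-- consumes the original list front-to-back; that pop is modeled exactly as taking the head.
-- [0] * c for c ≤ 0 is []; List.replicate c.toNat 0 matches (toNat clamps negatives to 0).
def pvLoopB : List Int → List Int → List Int
  | [], decoded => decoded
  | x :: stack, decoded =>
    if x ≠ 0 then pvLoopB stack (decoded ++ [x])
    else
      match stack with
      | [] => decoded  -- Python raises IndexError (pop from empty stack); excluded by Pre_
      | c :: stack' => pvLoopB stack' (decoded ++ List.replicate c.toNat 0)

def reverse_run_length_alt (encoded : List Int) : List Int := pvLoopB encoded []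

-- ===== PRECONDITION & SPEC =====
-- RLE well-formedness grammar: every 0 is followed by a count element.
def pvRleOK : List Int → Bool
  | [] => true
  | x :: rest =>
    if x = 0 then
      match rest with
      | [] => false
      | _ :: rest' => pvRleOK rest'
    else pvRleOK rest

-- Pre_ excludes exactly the inputs where a 0 sits in the final (data) position, on which both Pythons raise IndexError.
def Pre_reverse_run_length (encoded : List Int) : Prop := pvRleOK encoded = true
instance (encoded : List Int) : Decidable (Pre_reverse_run_length encoded) := by
  unfold Pre_reverse_run_length; infer_instance

def pvWitness_reverse_run_length : List Int := [3, 0, 2, -1]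

def Spec_reverse_run_length (encoded : List Int) (out : List Int) : Prop := out = reverse_run_length_alt encoded
instance (encoded : List Int) (out : List Int) : Decidable (Spec_reverse_run_length encoded out) := by unfold Spec_reverse_run_length; infer_instance

-- ===== CLAIM (what is proved, stated in full; the proofs are below) =====
def Claim_equal_reverse_run_length : Prop := ∀ (encoded : List Int), Dom_reverse_run_length encoded → Pre_reverse_run_length encoded → Spec_reverse_run_length encoded (reverse_run_length encoded)

-- ===== LEMMAS AND PROOFS =====

lemma pvGetD_append_cons_succ (pre rest : List Int) (x c : Int) :
    PySem.List.pyGetD (pre ++ x :: c :: rest) ((pre.length : Int) + 1) 0 = c := by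
  have : ((pre.length : Int) + 1) = ((pre.length + 1 : Nat) : Int) := by push_cast; ring
  rw [this, PySem.List.pyGetD_natCast]
  simp [List.getD]

lemma pvRleOK_cons_ne {x : Int} (rest : List Int) (hx : x ≠ 0) (h : pvRleOK (x :: rest) = true) :
    pvRleOK rest = true := by
  rw [pvRleOK.eq_def] at h; simp [hx] at h; cases rest <;> simpa using h

lemma pvLoopB_cons_ne {x : Int} (stack decoded : List Int) (hx : x ≠ 0) :
    pvLoopB (x :: stack) decoded = pvLoopB stack (decoded ++ [x]) := by
  rw [pvLoopB.eq_def]; simp [hx]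

lemma pvLoopB_zero (c : Int) (stack' decoded : List Int) :
    pvLoopB (0 :: c :: stack') decoded = pvLoopB stack' (decoded ++ List.replicate c.toNat 0) := by
  rw [pvLoopB.eq_def]; simp

lemma pvLoopA : ∀ (suf pre acc : List Int), pvRleOK suf = true →
    (PySem.List.pyRange (pre.length : Int) (((pre ++ suf).length : Nat) : Int) 1).foldl
        (pvStepA (pre ++ suf)) (0, acc)
      = (0, pvLoopB suf acc) := by
  intro suf
  induction suf using pvRleOK.induct with
  | case1 =>
    intro pre acc _
    simp [PySem.List.pyRange_one_eq_nil, pvLoopB]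
  | case2 =>
    intro pre acc h
    exfalso
    rw [pvRleOK.eq_def] at h; simp at h
  | case3 c rest' ih =>
    intro pre acc h
    have hh : pvRleOK rest' = true := by
      rw [pvRleOK.eq_def] at h; simpa using h
    have hcons : PySem.List.pyRange (pre.length : Int) (((pre ++ 0 :: c :: rest').length : Nat) : Int) 1
        = (pre.length : Int) :: PySem.List.pyRange ((pre.length : Int) + 1) (((pre ++ 0 :: c :: rest').length : Nat) : Int) 1 := by
      apply PySem.List.pyRange_one_cons; simp only [List.length_append, List.length_cons]; push_cast; omega
    have hcons2 : PySem.List.pyRange ((pre.length : Int) + 1) (((pre ++ 0 :: c :: rest').length : Nat) : Int) 1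
        = ((pre.length : Int) + 1) :: PySem.List.pyRange ((pre.length : Int) + 1 + 1) (((pre ++ 0 :: c :: rest').length : Nat) : Int) 1 := by
      apply PySem.List.pyRange_one_cons; simp only [List.length_append, List.length_cons]; push_cast; omega
    rw [hcons, hcons2]
    simp only [List.foldl_cons]
    have hstep : pvStepA (pre ++ 0 :: c :: rest') (0, acc) (pre.length : Int)
        = (1, acc ++ List.replicate c.toNat 0) := by
      simp [pvStepA, pvGetD_append_cons_succ]
    rw [hstep]
    have hstep2 : pvStepA (pre ++ 0 :: c :: rest') (1, acc ++ List.replicate c.toNat 0) ((pre.length : Int) + 1)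
        = (0, acc ++ List.replicate c.toNat 0) := by
      simp [pvStepA]
    rw [hstep2]
    have := ih (pre ++ [0, c]) (acc ++ List.replicate c.toNat 0) hh
    simp only [List.append_assoc, List.cons_append, List.nil_append] at this
    have hlen : ((pre ++ [0, c]).length : Int) = (pre.length : Int) + 1 + 1 := by simp; ring
    rw [hlen] at this
    rw [this, pvLoopB_zero]
  | case4 x rest hx ih =>
    intro pre acc h
    have hcons : PySem.List.pyRange (pre.length : Int) (((pre ++ x :: rest).length : Nat) : Int) 1
        = (pre.length : Int) :: PySem.List.pyRange ((pre.length : Int) + 1) (((pre ++ x :: rest).length : Nat) : Int) 1 := by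
      apply PySem.List.pyRange_one_cons; simp only [List.length_append, List.length_cons]; push_cast; omega
    rw [hcons]
    simp only [List.foldl_cons]
    have hstep : pvStepA (pre ++ x :: rest) (0, acc) (pre.length : Int) = (0, acc ++ [x]) := by
      simp [pvStepA, hx]
    rw [hstep]
    have := ih (pre ++ [x]) (acc ++ [x]) (pvRleOK_cons_ne rest hx h)
    simp only [List.append_assoc, List.cons_append, List.nil_append] at this
    have hlen : ((pre ++ [x]).length : Int) = (pre.length : Int) + 1 := by simp
    rw [hlen] at this
    rw [this, pvLoopB_cons_ne rest acc hx]

-- ===== VERDICT (by name: the statement is the Claim_ definition above) =====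
theorem reverse_run_length_spec : Claim_equal_reverse_run_length := by
  intro encoded _ hpre
  unfold Spec_reverse_run_length reverse_run_length reverse_run_length_alt
  have := pvLoopA encoded [] [] hpre
  simpa using congrArg Prod.snd this
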